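-- pv_equiv track=rewrite | github.com/NASA-JPL-Teamtools-Studio/tts_seq | src/tts_seq/core/scr_dict.py | extract_unquoted_comment_with_leading_ws
-- ===== SOURCE A (Python) =====
-- def extract_unquoted_comment_with_leading_ws(line):
--     """
--     Returns everything from the first unquoted semicolon, including any
--     whitespace immediately before it, to the end of the line.
--     Preserves all trailing spaces and newline.
--
--     :param line: The raw line string from the sequence file.
--     :type line: str
--     :return: The extracted comment string including leading whitespace and semicolon.
--     :rtype: str
--     """
--     in_quote = False
--     for i, c in enumerate(line):
--         if c == '"':
--             in_quote = not in_quote  # toggle quote state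
--         elif c == ';' and not in_quote:
--             # include whitespace immediately before semicolon
--             start = i
--             while start > 0 and line[start-1].isspace() and line[start-1] != '\n':
--                 start -= 1
--             return line[start:]  # preserve everything to the end
--
--     return ''  # no unquoted semicolon found
-- ===== SOURCE B (Python) =====
-- def extract_unquoted_comment_with_leading_ws(line):
--     """Single forward pass: track ws_start, the start of the current run of
--     non-newline whitespace, instead of backtracking when a ';' is found."""
--     in_quote = False
--     ws_start = 0
--     for i, c in enumerate(line):
--         if c == ';' and not in_quote:
--             return line[ws_start:]
--         if c == '"':
--             in_quote = not in_quote
--         if not (c.isspace() and c != '\n'):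
--             ws_start = i + 1
--     return ''
-- ===== Notes on version B (the rewrite author's own statement) =====
-- stated objective: alternative
-- what changed: Replaces A's lazy backward walk over preceding whitespace at the semicolon with an eagerly maintained ws_start accumulator, making the scan strictly one-directional with no inner loop.
import Mathlib
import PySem

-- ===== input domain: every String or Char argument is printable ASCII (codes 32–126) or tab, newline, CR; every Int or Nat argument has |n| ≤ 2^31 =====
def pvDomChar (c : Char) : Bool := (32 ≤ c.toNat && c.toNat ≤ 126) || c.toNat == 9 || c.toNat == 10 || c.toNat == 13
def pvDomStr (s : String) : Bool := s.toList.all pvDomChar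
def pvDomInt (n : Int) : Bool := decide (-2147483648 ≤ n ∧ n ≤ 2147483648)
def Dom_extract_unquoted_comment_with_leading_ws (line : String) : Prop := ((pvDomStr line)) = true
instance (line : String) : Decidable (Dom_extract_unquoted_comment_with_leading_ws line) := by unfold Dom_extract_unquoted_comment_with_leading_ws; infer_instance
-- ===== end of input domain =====

-- B replaces A's lazy backward whitespace walk at the semicolon with an eagerly
-- maintained ws_start accumulator (one strictly forward pass, no inner loop).

-- ===== PORT A =====
-- the inner `while start > 0 and line[start-1].isspace() and line[start-1] != '\n'` walk
def pvBackA (l : List Char) (start : Nat) : Nat :=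
  match start with
  | 0 => 0
  | s + 1 =>
    let c := l.getD s ' '
    if PySem.Chars.isspace c && c != '\n' then pvBackA l s else s + 1

-- the `for i, c in enumerate(line)` loop; `rest` is the unscanned suffix at index `i`
def pvLoopA (l : List Char) (i : Nat) (rest : List Char) (inq : Bool) : List Char :=
  match rest with
  | [] => []
  | c :: cs =>
    if c == '"' then pvLoopA l (i + 1) cs (!inq)
    else if c == ';' && !inq then l.drop (pvBackA l i)
    else pvLoopA l (i + 1) cs inq

def extract_unquoted_comment_with_leading_ws (line : String) : String :=
  String.ofList (pvLoopA line.toList 0 line.toList false)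

-- ===== PORT B =====
-- B's loop: ws is the start of the current run of non-newline whitespace
def pvLoopB (l : List Char) (i : Nat) (ws : Nat) (rest : List Char) (inq : Bool) : List Char :=
  match rest with
  | [] => []
  | c :: cs =>
    if c == ';' && !inq then l.drop ws
    else
      pvLoopB l (i + 1)
        (if PySem.Chars.isspace c && c != '\n' then ws else i + 1)
        cs (if c == '"' then !inq else inq)

def extract_unquoted_comment_with_leading_ws_alt (line : String) : String :=
  String.ofList (pvLoopB line.toList 0 0 line.toList false)

-- ===== PRECONDITION & SPEC =====
def Spec_extract_unquoted_comment_with_leading_ws (line : String) (out : String) : Prop := out = extract_unquoted_comment_with_leading_ws_alt line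
instance (line : String) (out : String) : Decidable (Spec_extract_unquoted_comment_with_leading_ws line out) := by unfold Spec_extract_unquoted_comment_with_leading_ws; infer_instance

-- ===== CLAIM (what is proved, stated in full; the proofs are below) =====
def Claim_equal_extract_unquoted_comment_with_leading_ws : Prop := ∀ (line : String), Dom_extract_unquoted_comment_with_leading_ws line → Spec_extract_unquoted_comment_with_leading_ws line (extract_unquoted_comment_with_leading_ws line)

-- ===== LEMMAS AND PROOFS =====

-- Invariant: when the scan stands at index i (rest = l.drop i) and B's accumulator
-- equals pvBackA l i (the result of A's backward walk from i), the two loops agree.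
theorem pvLoop_eq (l : List Char) :
    ∀ (rest : List Char) (i : Nat) (inq : Bool), rest = l.drop i →
      pvLoopA l i rest inq = pvLoopB l i (pvBackA l i) rest inq := by
  intro rest
  induction rest with
  | nil => intro i inq _; rfl
  | cons c cs ih =>
    intro i inq hrest
    have hget : l.getD i ' ' = c := by
      have h0 : (l.drop i).getD 0 ' ' = c := by rw [← hrest]; rfl
      simpa [List.getD, List.getElem?_drop] using h0
    have hcs : cs = l.drop (i + 1) := by
      have h1 : (l.drop i).drop 1 = l.drop (i + 1) := by
        rw [List.drop_drop]
      rw [← h1, ← hrest]; rfl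
    have hback : pvBackA l (i + 1) =
        (if PySem.Chars.isspace c && c != '\n' then pvBackA l i else i + 1) := by
      simp only [pvBackA]
      rw [hget]
    rcases hq : (c == '"') with _ | _
    · rcases hsemi : (c == ';' && !inq) with _ | _
      · -- ordinary character: both loops recurse
        simp only [pvLoopA, pvLoopB, hq, hsemi, if_false, Bool.false_eq_true]
        rw [ih (i + 1) inq hcs, hback]

      · -- unquoted semicolon: A returns l.drop (pvBackA l i), B returns l.drop ws
        simp only [pvLoopA, pvLoopB, hq, hsemi, if_false, if_true, Bool.false_eq_true]
    · -- a double quote: toggle; in B the semicolon test is false since c = '"'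
      have hc : c = '"' := by simpa using hq
      have hsemi : (c == ';' && !inq) = false := by subst hc; simp
      have hws : PySem.Chars.isspace c = false := by subst hc; decide
      simp only [pvLoopA, pvLoopB, hq, hsemi, if_true, if_false, Bool.false_eq_true]
      rw [ih (i + 1) (!inq) hcs, hback, hws]

-- ===== VERDICT (by name: the statement is the Claim_ definition above) =====
theorem extract_unquoted_comment_with_leading_ws_spec : Claim_equal_extract_unquoted_comment_with_leading_ws := by
  intro line _
  unfold Spec_extract_unquoted_comment_with_leading_ws
  unfold extract_unquoted_comment_with_leading_ws extract_unquoted_comment_with_leading_ws_alt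
  rw [pvLoop_eq line.toList line.toList 0 false (by simp)]
  rfl
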